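-- pv_equiv track=rewrite | github.com/miliar/Code_Jam_Webscraper | solutions_python/Problem_178/2356.py | get_prefix_len
-- ===== SOURCE A (Python) =====
-- def get_prefix_len(s: str) -> int:
--     count = 0
--     base = s[0]
--     for ch in s:
--         if ch != base:
--             break
--         count += 1
--     return count
-- ===== SOURCE B (Python) =====
-- def get_prefix_len(s: str) -> int:
--     return len(s) - len(s.lstrip(s[0]))
-- ===== Notes on version B (the rewrite author's own statement) =====
-- stated objective: simpler
-- what changed: Replaced the explicit count-and-break loop with len(s) - len(s.lstrip(s[0])), which strips the leading run and measures what was removed.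
import Mathlib
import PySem

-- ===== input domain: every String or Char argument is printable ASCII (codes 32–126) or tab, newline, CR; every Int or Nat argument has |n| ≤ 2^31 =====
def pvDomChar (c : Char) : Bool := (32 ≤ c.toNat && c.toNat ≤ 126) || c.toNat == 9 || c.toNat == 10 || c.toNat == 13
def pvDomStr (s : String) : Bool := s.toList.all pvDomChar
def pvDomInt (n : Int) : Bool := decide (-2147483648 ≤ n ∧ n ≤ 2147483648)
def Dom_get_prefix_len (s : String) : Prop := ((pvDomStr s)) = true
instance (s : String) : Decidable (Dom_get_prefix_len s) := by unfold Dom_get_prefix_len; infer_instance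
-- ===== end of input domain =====

-- B replaces A's count-and-break loop by stripping the leading run (len(s) - len(s.lstrip(s[0]))): simpler one-liner, same O(n) cost.
-- Pre_ excludes the empty string, on which both A and B raise IndexError (s[0]).


-- ===== PORT A =====
-- the for-loop with break: count matching chars until the first mismatch
def getPrefixLenLoop (base : Char) : List Char → Int
  | [] => 0
  | c :: rest => if c ≠ base then 0 else 1 + getPrefixLenLoop base rest

def get_prefix_len (s : String) : Int :=
  match s.toList with
  | [] => 0            -- unreachable under Pre_ (Python raises IndexError on s[0])
  | b :: _ => getPrefixLenLoop b s.toList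

-- ===== PORT B =====
-- len(s) - len(s.lstrip(s[0])): lstrip of a single char = dropWhile (· == that char)
def get_prefix_len_alt (s : String) : Int :=
  match s.toList with
  | [] => 0            -- unreachable under Pre_ (Python raises IndexError on s[0])
  | b :: _ => (s.toList.length : Int) - ((s.toList.dropWhile (· == b)).length : Int)

-- ===== PRECONDITION & SPEC =====
-- Pre_ excludes the empty string: A raises IndexError there (s[0]).
def Pre_get_prefix_len (s : String) : Prop := s ≠ ""
instance (s : String) : Decidable (Pre_get_prefix_len s) := by unfold Pre_get_prefix_len; infer_instance
def pvWitness_get_prefix_len : String := "aab"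

def Spec_get_prefix_len (s : String) (out : Int) : Prop := out = get_prefix_len_alt s
instance (s : String) (out : Int) : Decidable (Spec_get_prefix_len s out) := by unfold Spec_get_prefix_len; infer_instance

-- ===== CLAIM (what is proved, stated in full; the proofs are below) =====
def Claim_equal_get_prefix_len : Prop := ∀ (s : String), Dom_get_prefix_len s → Pre_get_prefix_len s → Spec_get_prefix_len s (get_prefix_len s)

-- ===== LEMMAS AND PROOFS =====
theorem getPrefixLenLoop_eq (b : Char) (l : List Char) :
    getPrefixLenLoop b l = (l.length : Int) - ((l.dropWhile (· == b)).length : Int) := by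
  induction l with
  | nil => simp [getPrefixLenLoop]
  | cons c rest ih =>
    by_cases h : c = b
    · subst h
      simp [getPrefixLenLoop, List.dropWhile, ih]
      omega
    · have hb : (c == b) = false := by simp [h]
      simp [getPrefixLenLoop, List.dropWhile, h, hb]

-- ===== VERDICT (by name: the statement is the Claim_ definition above) =====
theorem get_prefix_len_spec : Claim_equal_get_prefix_len := by
  intro s _ _
  unfold Spec_get_prefix_len get_prefix_len get_prefix_len_alt
  cases h : s.toList with
  | nil => simp
  | cons b rest => simp [getPrefixLenLoop_eq]
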